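-- pv_equiv track=rewrite | github.com/diegorodriguezv/aoc | 2022/08.py | from_right
-- ===== SOURCE A (Python) =====
-- def create_vis_map(rows, cols):
--     _map = []
--     for _ in range(rows):
--         _map.append([True] * cols)
--     return _map
--
-- def from_right(_map):
--     rows = len(_map)
--     cols = len(_map[0])
--     _max = [_map[row][cols - 1] for row in range(rows)]
--     vis = create_vis_map(rows, cols)
--     for col in range(cols - 2, 0, -1):
--         for row in range(rows - 2, 0, -1):
--             el = _map[row][col]
--             if el <= _max[row]:
--                 vis[row][col] = False
--             if el > _max[row]:
--                 _max[row] = el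
--     return vis
-- ===== SOURCE B (Python) =====
-- def from_right(_map):
--     rows, cols = len(_map), len(_map[0])
--
--     def visible(row, col):
--         if row == 0 or row == rows - 1 or col == 0 or col == cols - 1:
--             return True
--         return _map[row][col] > max(_map[row][col + 1:cols])
--
--     return [[visible(row, col) for col in range(cols)] for row in range(rows)]
-- ===== Notes on version B (the rewrite author's own statement) =====
-- stated objective: simpler
-- what changed: Replaces A's stateful right-to-left sweep carrying a per-row running-max array and mutating an all-True grid with a direct nested comprehension that computes each cell independently as 'taller than the max of its row suffix', borders trivially True.
import Mathlib
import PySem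

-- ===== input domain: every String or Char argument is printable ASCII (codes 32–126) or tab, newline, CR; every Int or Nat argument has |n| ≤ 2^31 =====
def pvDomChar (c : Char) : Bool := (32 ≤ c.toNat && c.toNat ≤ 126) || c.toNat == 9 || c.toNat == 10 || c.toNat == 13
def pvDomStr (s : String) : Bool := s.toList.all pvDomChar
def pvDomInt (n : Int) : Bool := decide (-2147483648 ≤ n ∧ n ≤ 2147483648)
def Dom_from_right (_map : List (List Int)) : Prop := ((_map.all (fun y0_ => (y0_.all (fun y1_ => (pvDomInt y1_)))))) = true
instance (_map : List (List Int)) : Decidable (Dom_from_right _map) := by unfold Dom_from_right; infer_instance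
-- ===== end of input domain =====

-- B replaces A's stateful right-to-left running-max sweep with a per-cell "taller than the max
-- of its row suffix" comprehension (simpler, not faster).


-- ===== PORT A =====
-- range(k, 0, -1) = [k, k-1, …, 1]  (all indices are nonnegative Python ints, kept as Nat)
def downFrom (k : Nat) : List Nat := (List.range' 1 k).reverse

-- loop body of A's inner `for row in …`: state is (_max, vis); list indexing is exact under
-- Pre_from_right (all indices in range), ported with getD
def aStep (_map : List (List Int)) (c : Nat) (st : List Int × List (List Bool)) (r : Nat) :
    List Int × List (List Bool) :=
  let el := (_map.getD r []).getD c 0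
  let st1 := if el ≤ st.1.getD r 0 then (st.1, st.2.modify r (fun vrow => vrow.set c false)) else st
  if el > st1.1.getD r 0 then (st1.1.set r el, st1.2) else st1

def from_right (_map : List (List Int)) : List (List Bool) :=
  let rows := _map.length
  let cols := (_map.getD 0 []).length
  let max0 := (List.range rows).map (fun row => (_map.getD row []).getD (cols - 1) 0)
  let vis0 := (List.range rows).map (fun _ => (List.range cols).map (fun _ => true))
  ((downFrom (cols - 2)).foldl
    (fun st c => (downFrom (rows - 2)).foldl (aStep _map c) st) (max0, vis0)).2

-- ===== PORT B =====
-- _map[row][col] > max(_map[row][col+1:cols])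
def tall (_map : List (List Int)) (cols row col : Nat) : Bool :=
  decide ((_map.getD row []).getD col 0 >
    ((PySem.List.max? (PySem.List.slice (_map.getD row []) (some ((col : Int) + 1)) (some (cols : Int)))
      (fun y => y)).getD 0))

def visibleB (_map : List (List Int)) (rows cols row col : Nat) : Bool :=
  if row = 0 ∨ row = rows - 1 ∨ col = 0 ∨ col = cols - 1 then true
  else tall _map cols row col

def from_right_alt (_map : List (List Int)) : List (List Bool) :=
  let rows := _map.length
  let cols := (_map.getD 0 []).length
  (List.range rows).map (fun row => (List.range cols).map (fun col => visibleB _map rows cols row col))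

-- ===== PRECONDITION & SPEC =====
-- Pre_ excludes exactly the inputs on which A raises IndexError: the empty grid, a grid whose
-- first row is empty, and grids with some row shorter than the first row.
def Pre_from_right (_map : List (List Int)) : Prop :=
  _map ≠ [] ∧ 1 ≤ (_map.getD 0 []).length ∧ ∀ row ∈ _map, (_map.getD 0 []).length ≤ row.length
instance (_map : List (List Int)) : Decidable (Pre_from_right _map) := by unfold Pre_from_right; infer_instance

def pvWitness_from_right : List (List Int) := [[3, 1, 2], [5, 0, 4], [1, 2, 3], [9, 9, 9]]

def Spec_from_right (_map : List (List Int)) (out : List (List Bool)) : Prop := out = from_right_alt _map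
instance (_map : List (List Int)) (out : List (List Bool)) : Decidable (Spec_from_right _map out) := by unfold Spec_from_right; infer_instance

-- ===== CLAIM (what is proved, stated in full; the proofs are below) =====
def Claim_equal_from_right : Prop := ∀ (_map : List (List Int)), Dom_from_right _map → Pre_from_right _map → Spec_from_right _map (from_right _map)

-- ===== LEMMAS AND PROOFS =====

-- max of a nonempty Python list, as B computes it (0 only on the empty list, unreached under Pre_)
def maxOf (l : List Int) : Int := match l with | [] => 0 | x :: t => t.foldl max x

-- the slice _map[row][k:cols]
def sfx (row : List Int) (k cols : Nat) : List Int := (row.drop k).take (cols - k)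

def entry (vis : List (List Bool)) (r c : Nat) : Bool := (vis.getD r []).getD c true

def Shape (R C : Nat) (mx : List Int) (vis : List (List Bool)) : Prop :=
  mx.length = R ∧ vis.length = R ∧ ∀ r, r < R → (vis.getD r []).length = C

-- invariant after the outer loop has processed columns cols-2 … k
def OuterInv (m : List (List Int)) (R C k : Nat) (mx : List Int) (vis : List (List Bool)) : Prop :=
  Shape R C mx vis ∧
  (∀ r, 1 ≤ r → r + 1 < R → k + 1 ≤ C → mx.getD r 0 = maxOf (sfx (m.getD r []) k C)) ∧
  (∀ r c', r < R → c' < C → entry vis r c' =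
    (if 1 ≤ r ∧ r + 1 < R ∧ 1 ≤ c' ∧ c' + 1 < C ∧ k ≤ c' then tall m C r c' else true))

-- invariant inside column c, after the inner loop has processed rows rows-2 … i+1
def InnerInv (m : List (List Int)) (R C c i : Nat) (mx : List Int) (vis : List (List Bool)) : Prop :=
  Shape R C mx vis ∧
  (∀ r, 1 ≤ r → r + 1 < R →
    mx.getD r 0 = maxOf (sfx (m.getD r []) (if r ≤ i then c + 1 else c) C)) ∧
  (∀ r c', r < R → c' < C → entry vis r c' =
    (if 1 ≤ r ∧ r + 1 < R ∧ 1 ≤ c' ∧ c' + 1 < C ∧ (c < c' ∨ (c' = c ∧ i < r)) then tall m C r c'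
     else true))

theorem downFrom_succ (k : Nat) : downFrom (k + 1) = (k + 1) :: downFrom k := by
  unfold downFrom
  rw [List.range'_concat]
  simp [Nat.add_comm]

theorem foldl_max_comm (t : List Int) (a b : Int) :
    t.foldl max (max a b) = max a (t.foldl max b) := by
  induction t generalizing b with
  | nil => simp
  | cons x xs ih => simp only [List.foldl_cons, max_assoc, ih]

theorem tall_eq (m : List (List Int)) (C r c : Nat) :
    tall m C r c = decide ((m.getD r []).getD c 0 > maxOf (sfx (m.getD r []) (c + 1) C)) := by
  unfold tall
  have h1 : ((c : Int) + 1) = ((c + 1 : Nat) : Int) := by push_cast; ring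
  rw [h1, PySem.List.slice_natCast]
  unfold sfx maxOf
  congr 2
  cases hx : (((m.getD r []).drop (c+1)).take (C - (c+1))) with
  | nil => simp [PySem.List.max?]
  | cons x t => rw [PySem.List.max?_id_cons]; rfl

theorem sfx_step (row : List Int) (c C : Nat) (hc : c + 1 < C) (hlen : C ≤ row.length) :
    maxOf (sfx row c C) = max (row.getD c 0) (maxOf (sfx row (c + 1) C)) := by
  have hcl : c < row.length := by omega
  have h1 : sfx row c C = row[c] :: sfx row (c+1) C := by
    unfold sfx
    rw [List.drop_eq_getElem_cons hcl]
    have h2 : C - c = (C - (c+1)) + 1 := by omega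
    rw [h2, List.take_succ_cons]
  have h2 : sfx row (c+1) C ≠ [] := by
    unfold sfx
    intro h
    have := congrArg List.length h
    simp at this
    omega
  rw [h1]
  cases hx : sfx row (c+1) C with
  | nil => exact absurd hx h2
  | cons y t =>
    show (y :: t).foldl max row[c] = _
    simp only [List.foldl_cons, maxOf]
    rw [foldl_max_comm]
    congr 1
    exact (List.getD_eq_getElem row 0 hcl).symm

-- getD over set / modify, in-range forms
theorem getD_set_eq {α : Type} (l : List α) (i : Nat) (x d : α) (h : i < l.length) :
    (l.set i x).getD i d = x := by
  rw [List.getD_eq_getElem?_getD, List.getElem?_set]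
  simp [h]

theorem getD_set_ne {α : Type} (l : List α) (i r : Nat) (x d : α) (h : i ≠ r) :
    (l.set i x).getD r d = l.getD r d := by
  rw [List.getD_eq_getElem?_getD, List.getElem?_set, if_neg h, ← List.getD_eq_getElem?_getD]

theorem getD_modify_self {α : Type} (l : List α) (i : Nat) (f : α → α) (d : α)
    (h : i < l.length) : (l.modify i f).getD i d = f (l.getD i d) := by
  simp [List.getD_eq_getElem?_getD, List.getElem?_eq_getElem h]

theorem getD_modify_ne {α : Type} (l : List α) (i r : Nat) (f : α → α) (d : α)
    (h : i ≠ r) : (l.modify i f).getD r d = l.getD r d := by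
  simp [List.getD_eq_getElem?_getD, h]

theorem getD_mem {α : Type} (l : List α) (j : Nat) (d : α) (h : j < l.length) :
    l.getD j d ∈ l := by
  rw [List.getD_eq_getElem _ _ h]; exact List.getElem_mem h

theorem inner_step (m : List (List Int)) (R C c j : Nat)
    (hm : R = m.length) (hlen : ∀ row ∈ m, C ≤ row.length)
    (hc1 : 1 ≤ c) (hc2 : c + 1 < C) (hj1 : 1 ≤ j) (hj2 : j + 1 < R)
    (mx : List Int) (vis : List (List Bool)) (h : InnerInv m R C c j mx vis) :
    InnerInv m R C c (j - 1) (aStep m c (mx, vis) j).1 (aStep m c (mx, vis) j).2 := by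
  obtain ⟨⟨hmxlen, hvislen, hrowlen⟩, hmx, hvis⟩ := h
  have hrowmem : m.getD j [] ∈ m := getD_mem m j [] (by omega)
  have hrl : C ≤ (m.getD j []).length := hlen _ hrowmem
  have hmxj : mx.getD j 0 = maxOf (sfx (m.getD j []) (c + 1) C) := by
    have := hmx j hj1 hj2
    rwa [if_pos (le_refl j)] at this
  have hstep : maxOf (sfx (m.getD j []) c C) =
      max ((m.getD j []).getD c 0) (maxOf (sfx (m.getD j []) (c + 1) C)) :=
    sfx_step _ c C hc2 hrl
  by_cases hle : (m.getD j []).getD c 0 ≤ mx.getD j 0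
  · have ha : aStep m c (mx, vis) j =
        (mx, vis.modify j (fun vrow => vrow.set c false)) := by
      simp only [aStep]
      rw [if_pos hle]
      exact if_neg (not_lt.mpr hle)
    rw [ha]
    refine ⟨⟨hmxlen, by rw [List.length_modify]; exact hvislen, ?_⟩, ?_, ?_⟩
    · intro r hr
      by_cases hrj : r = j
      · subst hrj
        rw [getD_modify_self _ _ _ _ (by omega), List.length_set]
        exact hrowlen r hr
      · rw [getD_modify_ne _ _ _ _ _ (fun e => hrj e.symm)]
        exact hrowlen r hr
    · intro r h1 h2
      have := hmx r h1 h2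
      by_cases hrj : r = j
      · subst hrj
        rw [if_neg (by omega), hstep, ← hmxj]
        exact (max_eq_right hle).symm
      · by_cases hrj2 : r ≤ j - 1
        · rw [if_pos hrj2]
          rw [if_pos (by omega)] at this
          exact this
        · rw [if_neg hrj2]
          rw [if_neg (by omega)] at this
          exact this
    · intro r c' hr hc'
      by_cases hrj : r = j
      · subst hrj
        unfold entry
        rw [getD_modify_self _ _ _ _ (by omega)]
        by_cases hcc : c' = c
        · subst hcc
          rw [getD_set_eq _ _ _ _ (by rw [hrowlen r hr]; omega)]
          rw [if_pos ⟨hj1, hj2, by omega, by omega, Or.inr ⟨rfl, by omega⟩⟩]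
          rw [tall_eq]
          symm
          simp only [decide_eq_false_iff_not, not_lt]
          rw [← hmxj]
          exact hle
        · rw [getD_set_ne _ _ _ _ _ (fun e => hcc e.symm)]
          have := hvis r c' hr hc'
          unfold entry at this
          rw [this]
          exact if_congr (by omega) rfl rfl
      · unfold entry
        rw [getD_modify_ne _ _ _ _ _ (fun e => hrj e.symm)]
        have := hvis r c' hr hc'
        unfold entry at this
        rw [this]
        exact if_congr (by omega) rfl rfl
  · have ha : aStep m c (mx, vis) j =
        (mx.set j ((m.getD j []).getD c 0), vis) := by
      simp only [aStep]
      rw [if_neg hle]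
      exact if_pos (not_le.mp hle)
    rw [ha]
    refine ⟨⟨by rw [List.length_set]; exact hmxlen, hvislen, hrowlen⟩, ?_, ?_⟩
    · intro r h1 h2
      by_cases hrj : r = j
      · subst hrj
        rw [getD_set_eq _ _ _ _ (by omega), if_neg (by omega), hstep, ← hmxj]
        exact (max_eq_left (le_of_lt (not_le.mp hle))).symm
      · rw [getD_set_ne _ _ _ _ _ (fun e => hrj e.symm)]
        have := hmx r h1 h2
        by_cases hrj2 : r ≤ j - 1
        · rw [if_pos hrj2]
          rw [if_pos (by omega)] at this
          exact this
        · rw [if_neg hrj2]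
          rw [if_neg (by omega)] at this
          exact this
    · intro r c' hr hc'
      have := hvis r c' hr hc'
      rw [this]
      by_cases hrj : r = j
      · by_cases hcc : c' = c
        · subst hrj; subst hcc
          rw [if_neg (by omega), if_pos ⟨hj1, hj2, by omega, by omega, Or.inr ⟨rfl, by omega⟩⟩]
          rw [tall_eq]
          symm
          simp only [decide_eq_true_eq]
          rw [← hmxj]
          exact not_le.mp hle
        · exact if_congr (by omega) rfl rfl
      · exact if_congr (by omega) rfl rfl

theorem inner_fold (m : List (List Int)) (R C c : Nat)
    (hm : R = m.length) (hlen : ∀ row ∈ m, C ≤ row.length)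
    (hc1 : 1 ≤ c) (hc2 : c + 1 < C) :
    ∀ (i : Nat) (st : List Int × List (List Bool)), (i = 0 ∨ i + 1 < R) →
      InnerInv m R C c i st.1 st.2 →
      InnerInv m R C c 0 ((downFrom i).foldl (aStep m c) st).1
        ((downFrom i).foldl (aStep m c) st).2 := by
  intro i
  induction i with
  | zero => intro st _ h; exact h
  | succ k ih =>
    intro st hi h
    have hk2 : k + 1 + 1 < R := by omega
    rw [downFrom_succ]
    simp only [List.foldl_cons]
    have step := inner_step m R C c (k + 1) hm hlen hc1 hc2 (by omega) hk2 st.1 st.2 h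
    simp only [Nat.add_sub_cancel] at step
    exact ih (aStep m c (st.1, st.2) (k + 1)) (by omega) step

theorem outer_to_inner (m : List (List Int)) (R C c : Nat) (hc2 : c + 1 < C)
    (mx : List Int) (vis : List (List Bool)) (h : OuterInv m R C (c + 1) mx vis) :
    InnerInv m R C c (R - 2) mx vis := by
  obtain ⟨hs, hmx, hvis⟩ := h
  refine ⟨hs, ?_, ?_⟩
  · intro r h1 h2
    rw [if_pos (by omega)]
    exact hmx r h1 h2 (by omega)
  · intro r c' hr hc'
    rw [hvis r c' hr hc']
    exact if_congr (by omega) rfl rfl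

theorem inner_to_outer (m : List (List Int)) (R C c : Nat) (_hc1 : 1 ≤ c) (_hc2 : c + 1 < C)
    (mx : List Int) (vis : List (List Bool)) (h : InnerInv m R C c 0 mx vis) :
    OuterInv m R C c mx vis := by
  obtain ⟨hs, hmx, hvis⟩ := h
  refine ⟨hs, ?_, ?_⟩
  · intro r h1 h2 _
    have := hmx r h1 h2
    rwa [if_neg (by omega)] at this
  · intro r c' hr hc'
    rw [hvis r c' hr hc']
    exact if_congr (by omega) rfl rfl

theorem outer_fold (m : List (List Int)) (R C : Nat)
    (hm : R = m.length) (_hR : 1 ≤ R) (hlen : ∀ row ∈ m, C ≤ row.length) :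
    ∀ (j : Nat) (st : List Int × List (List Bool)), (j = 0 ∨ j + 1 < C) →
      OuterInv m R C (j + 1) st.1 st.2 →
      OuterInv m R C 1
        ((downFrom j).foldl (fun st c => (downFrom (R - 2)).foldl (aStep m c) st) st).1
        ((downFrom j).foldl (fun st c => (downFrom (R - 2)).foldl (aStep m c) st) st).2 := by
  intro j
  induction j with
  | zero => intro st _ h; exact h
  | succ k ih =>
    intro st hj h
    have hk2 : k + 1 + 1 < C := by omega
    rw [downFrom_succ]
    simp only [List.foldl_cons]
    have hin := outer_to_inner m R C (k + 1) hk2 st.1 st.2 h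
    have hfold := inner_fold m R C (k + 1) hm hlen (by omega) hk2 (R - 2) st (by omega) hin
    have hout := inner_to_outer m R C (k + 1) (by omega) hk2 _ _ hfold
    exact ih ((downFrom (R - 2)).foldl (aStep m (k + 1)) st) (by omega) hout

theorem init_inv (m : List (List Int)) (R C : Nat)
    (hm : R = m.length) (hC : C = (m.getD 0 []).length) (hC1 : 1 ≤ C)
    (hlen : ∀ row ∈ m, C ≤ row.length) :
    OuterInv m R C ((C - 2) + 1)
      ((List.range R).map (fun row => (m.getD row []).getD (C - 1) 0))
      ((List.range R).map (fun _ => (List.range C).map (fun _ => true))) := by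
  refine ⟨⟨by simp, by simp, ?_⟩, ?_, ?_⟩
  · intro r hr
    rw [PySem.List.getD_map_range _ _ _ _ hr]
    simp
  · intro r h1 h2 hg
    have hC2 : 2 ≤ C := by omega
    have hrow : C ≤ (m.getD r []).length := hlen _ (getD_mem m r [] (by omega))
    rw [PySem.List.getD_map_range _ _ _ _ (by omega)]
    have hC12 : C - 2 + 1 = C - 1 := by omega
    rw [hC12]
    have hone : sfx (m.getD r []) (C - 1) C = [(m.getD r [])[C - 1]'(by omega)] := by
      unfold sfx
      rw [show C - (C - 1) = 1 from by omega,
        List.drop_eq_getElem_cons (by omega : C - 1 < (m.getD r []).length)]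
      rfl
    rw [hone]
    exact List.getD_eq_getElem _ _ (by omega)
  · intro r c' hr hc'
    unfold entry
    rw [PySem.List.getD_map_range _ _ _ _ hr, PySem.List.getD_map_range _ _ _ _ hc']
    rw [if_neg (by omega)]

theorem final_eq (m : List (List Int)) (R C : Nat)
    (hm : R = m.length) (hC : C = (m.getD 0 []).length)
    (vis : List (List Bool)) (mx : List Int) (h : OuterInv m R C 1 mx vis) :
    vis = from_right_alt m := by
  obtain ⟨⟨hmxlen, hvislen, hrowlen⟩, hmx, hvis⟩ := h
  unfold from_right_alt
  apply List.ext_getElem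
  · simp [hvislen, hm]
  · intro r hr1 hr2
    have hrR : r < R := by rwa [hvislen] at hr1
    rw [List.getElem_map, List.getElem_range]
    apply List.ext_getElem
    · rw [List.length_map, List.length_range]
      rw [← List.getD_eq_getElem vis [] hr1, hrowlen r hrR]
      exact hC
    · intro c' hc1' hc2'
      rw [List.getElem_map, List.getElem_range]
      have hcC : c' < C := by
        rw [← List.getD_eq_getElem vis [] hr1, hrowlen r hrR] at hc1'
        exact hc1'
      have he : vis[r][c'] = entry vis r c' := by
        unfold entry
        rw [List.getD_eq_getElem vis [] hr1, List.getD_eq_getElem _ _ hc1']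
      rw [he, hvis r c' hrR hcC]
      unfold visibleB
      rw [← hm, ← hC]
      by_cases hb : r = 0 ∨ r = R - 1 ∨ c' = 0 ∨ c' = C - 1
      · rw [if_pos hb, if_neg (by omega)]
      · rw [if_neg hb, if_pos (by omega)]

-- ===== VERDICT (by name: the statement is the Claim_ definition above) =====
theorem from_right_spec : Claim_equal_from_right := by
  intro m _hdom hpre
  obtain ⟨hne, hC1, hlen⟩ := hpre
  unfold Spec_from_right from_right
  have hR : 1 ≤ m.length := by cases m with | nil => simp at hne | cons a l => simp
  have key := outer_fold m m.length (m.getD 0 []).length rfl hR hlen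
    ((m.getD 0 []).length - 2)
    (((List.range m.length).map (fun row => (m.getD row []).getD ((m.getD 0 []).length - 1) 0)),
     ((List.range m.length).map (fun _ => (List.range (m.getD 0 []).length).map (fun _ => true))))
    (by omega)
    (init_inv m m.length (m.getD 0 []).length rfl rfl hC1 hlen)
  exact final_eq m m.length (m.getD 0 []).length rfl rfl _ _ key
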